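-- pv_equiv track=rewrite | github.com/RahatKarim1795/tutorial_tanjil | tanjil's work/Asgn1.py | update_sales
-- ===== SOURCE A (Python) =====
-- def update_sales(sales, return_file):
--
--     returns = {}
--
--     for line in return_file[1:]:
--         split_line = line.strip().split(",")
--         transaction_id = split_line[0]
--         returns[transaction_id] = True
--
--     updated_sales = {}
--
--     for transaction_id, transaction_details in sales.items():
--         if transaction_id not in returns:
--             updated_sales[transaction_id] = transaction_details
--
--     return updated_sales
-- ===== SOURCE B (Python) =====
-- def update_sales(sales, return_file):
--     updated_sales = dict(sales)
--     for line in return_file[1:]: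
--         transaction_id = line.strip().split(",")[0]
--         updated_sales.pop(transaction_id, None)
--     return updated_sales
-- ===== Notes on version B (the rewrite author's own statement) =====
-- stated objective: simpler
-- what changed: B makes one ordered copy of sales and deletes each returned transaction id from it with pop(id, None), instead of A's two-phase build-a-returns-index-then-refilter-all-of-sales into a fresh dict.
import Mathlib
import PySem

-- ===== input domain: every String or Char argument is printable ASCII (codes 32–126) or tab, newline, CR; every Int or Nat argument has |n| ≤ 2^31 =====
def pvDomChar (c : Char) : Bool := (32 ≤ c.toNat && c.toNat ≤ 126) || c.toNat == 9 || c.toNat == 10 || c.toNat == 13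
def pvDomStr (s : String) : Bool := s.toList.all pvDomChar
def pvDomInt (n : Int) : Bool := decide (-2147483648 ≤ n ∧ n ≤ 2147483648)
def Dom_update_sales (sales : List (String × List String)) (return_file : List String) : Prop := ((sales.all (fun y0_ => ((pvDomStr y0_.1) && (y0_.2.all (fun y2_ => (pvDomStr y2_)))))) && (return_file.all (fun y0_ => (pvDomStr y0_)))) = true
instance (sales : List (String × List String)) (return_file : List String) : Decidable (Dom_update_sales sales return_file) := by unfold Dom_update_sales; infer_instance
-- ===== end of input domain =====

-- B makes one ordered copy of sales and pops each returned id from it, instead of A's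
-- build-a-returns-index-then-refilter-sales; same return value, proved equal below.

-- shared parse of one return line: line.strip().split(",")[0]
-- (split? with the non-empty separator "," is always some, and the list is never empty,
--  so getD []/headD "" are exact for split_line[0])
def pvParseId (line : String) : String :=
  ((PySem.Str.split? (PySem.Str.strip line) ",").getD []).headD ""

-- ===== PORT A =====
def update_sales (sales : List (String × List String)) (return_file : List String) : List (String × List String) :=
  let returns : PySem.Dict String Bool :=
    (PySem.List.slice return_file (some 1) none).foldl
      (fun d line => d.insert (pvParseId line) true) PySem.Dict.empty
  let updated_sales : PySem.Dict String (List String) :=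
    sales.foldl
      (fun d p => if (returns.contains p.1) = true then d else d.insert p.1 p.2)
      PySem.Dict.empty
  updated_sales.items

-- ===== PORT B =====
def update_sales_alt (sales : List (String × List String)) (return_file : List String) : List (String × List String) :=
  let updated : PySem.Dict String (List String) :=
    (PySem.List.slice return_file (some 1) none).foldl
      (fun d line =>
        -- updated_sales.pop(transaction_id, None): remove if present, else unchanged
        match d.pop? (pvParseId line) with
        | some (_, d') => d'
        | none => d)
      (PySem.Dict.ofList sales)
  updated.items

-- ===== PRECONDITION & SPEC =====
def Spec_update_sales (sales : List (String × List String)) (return_file : List String) (out : List (String × List String)) : Prop := out = update_sales_alt sales return_file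
instance (sales : List (String × List String)) (return_file : List String) (out : List (String × List String)) : Decidable (Spec_update_sales sales return_file out) := by unfold Spec_update_sales; infer_instance

-- ===== CLAIM (what is proved, stated in full; the proofs are below) =====
def Claim_equal_update_sales : Prop := ∀ (sales : List (String × List String)) (return_file : List String), Dom_update_sales sales return_file → Spec_update_sales sales return_file (update_sales sales return_file)

-- ===== LEMMAS AND PROOFS =====

-- contains of the returns-index fold: membership among the parsed ids
theorem pv_contains_returns (lines : List String) (d : PySem.Dict String Bool) (k : String) :
    (lines.foldl (fun d line => d.insert (pvParseId line) true) d).contains k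
      = (d.contains k || lines.any (fun l => k == pvParseId l)) := by
  induction lines generalizing d with
  | nil => simp
  | cons l t ih =>
      simp only [List.foldl_cons, List.any_cons, ih, PySem.Dict.contains_insert]
      cases d.contains k <;> cases (k == pvParseId l) <;> simp

-- dict.pop(k, default) with the value ignored is erase
theorem pv_pop_step (d : PySem.Dict String (List String)) (k : String) :
    (match d.pop? k with
     | some (_, d') => d'
     | none => d) = d.erase k := by
  cases hg : d.get? k with
  | some v => simp [PySem.Dict.pop?, hg]
  | none =>
      simp only [PySem.Dict.pop?, hg, Option.map_none]
      apply Eq.symm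
      apply PySem.Dict.ext
      show List.filter _ d.items = d.items
      apply List.filter_eq_self.mpr
      intro p hp
      have hc : d.contains k = false := by
        rw [← PySem.Dict.get?_eq_none_iff_contains]; exact hg
      have hb : (p.1 == k) = false := by
        by_contra h
        have hb' : (p.1 == k) = true := by revert h; cases (p.1 == k) <;> simp
        have : d.items.any (fun q => q.1 == k) = true :=
          List.any_eq_true.mpr ⟨p, hp, hb'⟩
        rw [show d.items.any (fun q => q.1 == k) = d.contains k from rfl, hc] at this
        exact Bool.false_ne_true this
      simp [hb]

-- folding erase over the return lines filters the items list by key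
theorem pv_erase_fold (lines : List String) (d : PySem.Dict String (List String)) :
    (lines.foldl (fun d l => d.erase (pvParseId l)) d).items
      = d.items.filter (fun p => !lines.any (fun l => p.1 == pvParseId l)) := by
  induction lines generalizing d with
  | nil => simp
  | cons l t ih =>
      simp only [List.foldl_cons, ih, List.any_cons]
      show (List.filter _ (List.filter _ d.items)) = _
      rw [List.filter_filter]
      apply List.filter_congr
      intro p _
      cases (p.1 == pvParseId l) <;> cases (t.any fun l => p.1 == pvParseId l) <;> simp

-- list-level helpers about filtering an insert's items
theorem pv_filter_map_of_neg (Q : String → Bool) (k : String) (v : List String)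
    (hQ : Q k = false) (l : List (String × List String)) :
    (l.map (fun p => if (p.1 == k) = true then (k, v) else p)).filter (fun p => Q p.1)
      = l.filter (fun p => Q p.1) := by
  induction l with
  | nil => rfl
  | cons p t ih =>
      rw [List.map_cons]
      cases hp : (p.1 == k) with
      | true =>
          have hk : p.1 = k := eq_of_beq hp
          rw [if_pos rfl,
            List.filter_cons_of_neg (p := fun q => Q q.1) (a := (k, v)) (by simp [hQ]),
            List.filter_cons_of_neg (p := fun q => Q q.1) (a := p) (by simp [hk, hQ])]
          exact ih
      | false =>
          rw [if_neg (by simp)]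
          cases hq : Q p.1 with
          | true =>
              rw [List.filter_cons_of_pos (p := fun q => Q q.1) (a := p) hq,
                List.filter_cons_of_pos (p := fun q => Q q.1) (a := p) hq, ih]
          | false =>
              rw [List.filter_cons_of_neg (p := fun q => Q q.1) (a := p) (by simp [hq]),
                List.filter_cons_of_neg (p := fun q => Q q.1) (a := p) (by simp [hq])]
              exact ih

theorem pv_filter_map_of_pos (Q : String → Bool) (k : String) (v : List String)
    (hQ : Q k = true) (l : List (String × List String)) :
    (l.map (fun p => if (p.1 == k) = true then (k, v) else p)).filter (fun p => Q p.1)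
      = (l.filter (fun p => Q p.1)).map (fun p => if (p.1 == k) = true then (k, v) else p) := by
  induction l with
  | nil => rfl
  | cons p t ih =>
      rw [List.map_cons]
      cases hp : (p.1 == k) with
      | true =>
          have hk : p.1 = k := eq_of_beq hp
          rw [if_pos rfl,
            List.filter_cons_of_pos (p := fun q => Q q.1) (a := (k, v)) hQ,
            List.filter_cons_of_pos (p := fun q => Q q.1) (a := p) (by simp [hk, hQ]),
            List.map_cons, if_pos hp, ih]
      | false =>
          rw [if_neg (by simp)]
          cases hq : Q p.1 with
          | true =>
              rw [List.filter_cons_of_pos (p := fun q => Q q.1) (a := p) hq,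
                List.filter_cons_of_pos (p := fun q => Q q.1) (a := p) hq,
                List.map_cons, if_neg (by simp [hp]), ih]
          | false =>
              rw [List.filter_cons_of_neg (p := fun q => Q q.1) (a := p) (by simp [hq]),
                List.filter_cons_of_neg (p := fun q => Q q.1) (a := p) (by simp [hq])]
              exact ih

theorem pv_any_filter_of_pos (Q : String → Bool) (k : String) (hQ : Q k = true)
    (l : List (String × List String)) :
    (l.filter (fun p => Q p.1)).any (fun p => p.1 == k) = l.any (fun p => p.1 == k) := by
  induction l with
  | nil => rfl
  | cons p t ih =>
      cases hp : (p.1 == k) with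
      | true =>
          have hk : p.1 = k := eq_of_beq hp
          simp [hk, hQ]
      | false =>
          cases hq : Q p.1 <;> simp [hp, hq, ih]

-- skipping an entry whose key is filtered out leaves the filtered items unchanged
theorem pv_H1 (Q : String → Bool) (k : String) (v : List String) (hQ : Q k = false)
    (d : PySem.Dict String (List String)) :
    ((d.insert k v).items).filter (fun p => Q p.1) = d.items.filter (fun p => Q p.1) := by
  cases hc : d.contains k with
  | true =>
      rw [PySem.Dict.items_insert_of_contains d v hc]
      exact pv_filter_map_of_neg Q k v hQ d.items
  | false =>
      rw [PySem.Dict.items_insert_of_not_contains d v hc, List.filter_append]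
      simp [hQ]

-- inserting an entry whose key survives the filter commutes with filtering
theorem pv_H2 (Q : String → Bool) (k : String) (v : List String) (hQ : Q k = true)
    (d : PySem.Dict String (List String)) :
    (PySem.Dict.mk (d.items.filter (fun p => Q p.1))).insert k v
      = PySem.Dict.mk (((d.insert k v).items).filter (fun p => Q p.1)) := by
  have hcf : (PySem.Dict.mk (d.items.filter (fun p => Q p.1))).contains k = d.contains k := by
    show (d.items.filter (fun p => Q p.1)).any (fun p => p.1 == k)
      = d.items.any (fun p => p.1 == k)
    exact pv_any_filter_of_pos Q k hQ d.items
  cases hc : d.contains k with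
  | true =>
      apply PySem.Dict.ext
      rw [PySem.Dict.items_insert_of_contains _ v (by rw [hcf]; exact hc),
        PySem.Dict.items_insert_of_contains d v hc]
      show List.map _ (List.filter _ d.items) = List.filter _ (List.map _ d.items)
      exact (pv_filter_map_of_pos Q k v hQ d.items).symm
  | false =>
      apply PySem.Dict.ext
      rw [PySem.Dict.items_insert_of_not_contains _ v (by rw [hcf]; exact hc),
        PySem.Dict.items_insert_of_not_contains d v hc]
      show List.filter _ d.items ++ [(k, v)] = List.filter _ (d.items ++ [(k, v)])
      rw [List.filter_append]
      simp [hQ]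

-- A's skip-or-insert fold over sales equals inserting everything, then filtering the items
theorem pv_main (A0 : String → Bool) (sales : List (String × List String))
    (d : PySem.Dict String (List String)) :
    sales.foldl (fun d p => if (A0 p.1) = true then d else d.insert p.1 p.2)
        (PySem.Dict.mk (d.items.filter (fun p => !A0 p.1)))
      = PySem.Dict.mk
          (((sales.foldl (fun d p => d.insert p.1 p.2) d).items).filter (fun p => !A0 p.1)) := by
  induction sales generalizing d with
  | nil => rfl
  | cons p t ih =>
      simp only [List.foldl_cons]
      cases h : A0 p.1 with
      | true =>
          rw [if_pos rfl]
          have h1 := pv_H1 (fun x => !A0 x) p.1 p.2 (by simp [h]) d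
          rw [show (PySem.Dict.mk (d.items.filter (fun q => !A0 q.1)))
                = PySem.Dict.mk (((d.insert p.1 p.2).items).filter (fun q => !A0 q.1)) from
              congrArg PySem.Dict.mk h1.symm]
          exact ih (d.insert p.1 p.2)
      | false =>
          rw [if_neg (by simp), pv_H2 (fun x => !A0 x) p.1 p.2 (by simp [h]) d]
          exact ih (d.insert p.1 p.2)

-- ===== VERDICT (by name: the statement is the Claim_ definition above) =====
theorem update_sales_spec : Claim_equal_update_sales := by
  intro sales return_file _
  show update_sales sales return_file = update_sales_alt sales return_file
  rw [show update_sales sales return_file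
      = (sales.foldl
          (fun d p =>
            if (((PySem.List.slice return_file (some 1) none).foldl
                  (fun d line => d.insert (pvParseId line) true)
                  PySem.Dict.empty).contains p.1) = true
            then d else d.insert p.1 p.2)
          PySem.Dict.empty).items from rfl]
  rw [show update_sales_alt sales return_file
      = ((PySem.List.slice return_file (some 1) none).foldl
          (fun d line =>
            match d.pop? (pvParseId line) with
            | some (_, d') => d'
            | none => d)
          (PySem.Dict.ofList sales)).items from rfl]
  have hpop : (fun (d : PySem.Dict String (List String)) (line : String) =>
      match d.pop? (pvParseId line) with
      | some (_, d') => d'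
      | none => d) = fun d line => d.erase (pvParseId line) :=
    funext fun d => funext fun line => pv_pop_step d (pvParseId line)
  rw [hpop, pv_erase_fold]
  have hc : (fun (d : PySem.Dict String (List String)) (p : String × List String) =>
      if (((PySem.List.slice return_file (some 1) none).foldl
            (fun d line => d.insert (pvParseId line) true) PySem.Dict.empty).contains p.1) = true
      then d else d.insert p.1 p.2)
      = fun d p => if ((PySem.List.slice return_file (some 1) none).any
            (fun l => p.1 == pvParseId l)) = true then d else d.insert p.1 p.2 := by
    funext d p
    rw [pv_contains_returns]
    simp
  rw [hc]
  have hm := pv_main (fun k => (PySem.List.slice return_file (some 1) none).any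
      (fun l => k == pvParseId l)) sales PySem.Dict.empty
  rw [show (PySem.Dict.mk (((PySem.Dict.empty : PySem.Dict String (List String)).items).filter
        (fun p => !(PySem.List.slice return_file (some 1) none).any (fun l => p.1 == pvParseId l))))
      = (PySem.Dict.empty : PySem.Dict String (List String)) from rfl] at hm
  rw [hm]
  rfl
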